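-- pv_equiv track=rewrite | github.com/Alfaram/Alg | positions_nearest_number.py | distance_search
-- ===== SOURCE A (Python) =====
-- def distance_search(array, desired_number='0'):
--     length_array = len(array)
--     result = [0] * length_array
--     zeroes = [
--         index
--         for index, value in enumerate(array)
--         if value == desired_number
--     ]
--     first = zeroes[0]
--     for pos in range(first):
--         result[pos] = first - pos
--     for prev, next in zip(zeroes, zeroes[1:]):
--         for position in range(prev + 1, next):
--             result[position] = min(position - prev, next - position)
--     last = zeroes[-1]
--     if last != length_array - 1:
--         for pos in range(last + 1, length_array):
--             result[pos] = pos - last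
--     return result
-- ===== SOURCE B (Python) =====
-- def distance_search(array, desired_number='0'):
--     occurrences = [i for i, v in enumerate(array) if v == desired_number]
--     return [min(abs(i - j) for j in occurrences) for i in range(len(array))]
-- ===== Notes on version B (the rewrite author's own statement) =====
-- stated objective: simpler
-- what changed: Replaces A's three gap-filling write loops (prefix, between consecutive occurrences, suffix, writing into a preallocated array) by a direct per-index comprehension taking min(abs(i-j)) over the occurrence list.
-- outside the precondition, e.g. on distance_search([], '0'): A raises IndexError, B returns []; on distance_search(['1'], '0'): A raises IndexError, B raises ValueError
import Mathlib
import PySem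

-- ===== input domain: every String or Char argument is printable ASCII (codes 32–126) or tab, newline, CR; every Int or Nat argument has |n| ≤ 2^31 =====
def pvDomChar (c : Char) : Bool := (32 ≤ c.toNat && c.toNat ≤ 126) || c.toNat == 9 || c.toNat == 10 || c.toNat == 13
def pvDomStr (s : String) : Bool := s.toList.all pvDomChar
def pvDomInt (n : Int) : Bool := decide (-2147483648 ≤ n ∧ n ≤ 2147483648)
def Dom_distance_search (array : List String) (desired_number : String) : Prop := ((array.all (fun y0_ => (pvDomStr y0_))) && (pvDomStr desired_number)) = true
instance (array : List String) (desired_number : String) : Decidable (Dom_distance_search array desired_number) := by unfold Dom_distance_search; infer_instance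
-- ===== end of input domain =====

-- B is a plainer per-index formulation (min |i-j| over the occurrence list) replacing A's three
-- gap-filling write loops; equal wherever A returns (Pre_ excludes inputs where A raises IndexError).

-- ===== PORT A =====
-- zeroes = [index for index, value in enumerate(array) if value == desired_number]
def pvZeroes (array : List String) (desired_number : String) : List Int :=
  (PySem.List.enumerate array 0).filterMap (fun p => if p.2 = desired_number then some p.1 else none)

-- the body of A after computing `zeroes` (three write loops into result = [0]*len(array));
-- `first = zeroes[0]` / `last = zeroes[-1]`: Python raises when zeroes = [] (excluded by Pre_), the
-- port uses the pyGet? option with a dummy default there.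
def pvAcore (zeroes : List Int) (length_array : Nat) : List Int :=
  let result : List Int := List.replicate length_array 0
  let first : Int := (PySem.List.pyGet? zeroes 0).getD 0
  let result := (PySem.List.pyRange 0 first 1).foldl
      (fun r pos => PySem.List.pySetD r pos (first - pos)) result
  let result := (zeroes.zip zeroes.tail).foldl
      (fun r pq => (PySem.List.pyRange (pq.1 + 1) pq.2 1).foldl
        (fun r position => PySem.List.pySetD r position (min (position - pq.1) (pq.2 - position))) r)
      result
  let last : Int := (PySem.List.pyGet? zeroes (-1)).getD 0
  if last ≠ (length_array : Int) - 1 then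
    (PySem.List.pyRange (last + 1) (length_array : Int) 1).foldl
      (fun r pos => PySem.List.pySetD r pos (pos - last)) result
  else result

def distance_search (array : List String) (desired_number : String) : List Int :=
  pvAcore (pvZeroes array desired_number) array.length

-- ===== PORT B =====
-- [min(abs(i - j) for j in occurrences) for i in range(len(array))]; Python min raises on an
-- empty occurrence list (excluded by Pre_), the port uses min?'s option with a dummy default there.
def distance_search_alt (array : List String) (desired_number : String) : List Int :=
  let occurrences : List Int :=
    (PySem.List.enumerate array 0).filterMap (fun p => if p.2 = desired_number then some p.1 else none)
  (PySem.List.pyRange 0 (array.length : Int) 1).map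
    (fun i => (PySem.List.min? (occurrences.map (fun j => |i - j|)) (fun x => x)).getD 0)

-- ===== PRECONDITION & SPEC =====
-- Pre_ excludes exactly the inputs on which A raises IndexError (desired_number never occurs,
-- including the empty array); B also raises on those inputs except on [] itself.
def Pre_distance_search (array : List String) (desired_number : String) : Prop :=
  desired_number ∈ array
instance (array : List String) (desired_number : String) : Decidable (Pre_distance_search array desired_number) := by unfold Pre_distance_search; infer_instance

def pvWitness_distance_search : List String × String := (["1", "0", "1", "1", "0"], "0")

def Spec_distance_search (array : List String) (desired_number : String) (out : List Int) : Prop := out = distance_search_alt array desired_number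
instance (array : List String) (desired_number : String) (out : List Int) : Decidable (Spec_distance_search array desired_number out) := by unfold Spec_distance_search; infer_instance

-- ===== CLAIM (what is proved, stated in full; the proofs are below) =====
def Claim_equal_distance_search : Prop := ∀ (array : List String) (desired_number : String), Dom_distance_search array desired_number → Pre_distance_search array desired_number → Spec_distance_search array desired_number (distance_search array desired_number)

-- ===== LEMMAS AND PROOFS =====
-- generic: a fold of writes preserves length
theorem pv_length_foldl_setD (g : Int → Int) : ∀ (ps : List Int) (res : List Int),
    (ps.foldl (fun r p => PySem.List.pySetD r p (g p)) res).length = res.length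
  | [], _ => rfl
  | p :: ps, res => by
      rw [List.foldl_cons, pv_length_foldl_setD g ps]
      simp [PySem.List.length_pySetD]

-- generic: writing g p at every p ∈ range(a,b) — element i of the result
theorem pv_getElem?_foldl_setD (g : Int → Int) (b : Int) (a : Int) (res : List Int) (i : Nat)
    (ha : 0 ≤ a) (hb : b ≤ (res.length : Int)) :
    ((PySem.List.pyRange a b 1).foldl (fun r p => PySem.List.pySetD r p (g p)) res)[i]? =
      if a ≤ (i : Int) ∧ (i : Int) < b then some (g i) else res[i]? := by
  induction hk : (b - a).toNat generalizing a res with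
  | zero =>
      rw [PySem.List.pyRange_one_eq_nil (by omega), List.foldl_nil, if_neg (by omega)]
  | succ k ih =>
      rw [PySem.List.pyRange_one_cons (by omega), List.foldl_cons]
      rw [ih (a + 1) _ (by omega) (by simpa [PySem.List.length_pySetD] using hb) (by omega)]
      rw [PySem.List.pySetD_of_nonneg res (g a) ha]
      by_cases hc : a ≤ (i : Int) ∧ (i : Int) < b
      · by_cases hia : (i : Int) = a
        · rw [if_neg (by omega), if_pos hc]
          have hlt : a.toNat < res.length := by omega
          have : a.toNat = i := by omega
          rw [this, List.getElem?_set_self (by omega)]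
          congr 1
          congr 1
          omega
        · rw [if_pos (by omega), if_pos hc]
      · rw [if_neg (by omega), if_neg hc]
        rw [List.getElem?_set_ne (by omega)]

-- elements adjacent in a strictly sorted list split the list: everything is ≤ p or ≥ q
theorem pv_adj_split (l : List Int) (hs : l.Pairwise (· < ·)) (pq : Int × Int)
    (h : pq ∈ l.zip l.tail) : ∀ j ∈ l, j ≤ pq.1 ∨ pq.2 ≤ j := by
  intro j hj
  obtain ⟨k, hk, hkeq⟩ := List.getElem_of_mem h
  rw [List.getElem_zip] at hkeq
  have hk2 : k < l.tail.length := by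
    have := hk; rw [List.length_zip] at this; omega
  have hkl : k < l.length := by
    have := hk; rw [List.length_zip] at this; omega
  have hk1l : k + 1 < l.length := by
    have : l.tail.length = l.length - 1 := List.length_tail
    omega
  have htl : l.tail[k] = l[k + 1] := List.getElem_tail _
  obtain ⟨m, hm, hmeq⟩ := List.getElem_of_mem hj
  have hpair := List.pairwise_iff_getElem.mp hs
  by_cases hmk : m ≤ k
  · left
    have : l[m] ≤ l[k] := by
      rcases Nat.lt_or_ge m k with h' | h'
      · exact le_of_lt (hpair m k hm hkl h')
      · have : m = k := by omega
        subst this; exact le_refl _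
    rw [hmeq] at this
    have : pq.1 = l[k] := by rw [← hkeq]
    omega
  · right
    have : l[k + 1] ≤ l[m] := by
      rcases Nat.lt_or_ge (k + 1) m with h' | h'
      · exact le_of_lt (hpair (k + 1) m hk1l hm h')
      · have : k + 1 = m := by omega
        subst this; exact le_refl _
    rw [hmeq] at this
    have : pq.2 = l.tail[k] := by rw [← hkeq]
    rw [htl] at this
    omega

-- the middle loop of A: element i of the fold over consecutive pairs
theorem pv_getElem?_foldl_pairs (i : Nat) : ∀ (l : List Int) (res : List Int),
    l.Pairwise (· < ·) → (∀ x ∈ l, 0 ≤ x) → (∀ x ∈ l, x ≤ (res.length : Int)) →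
    ((l.zip l.tail).foldl
        (fun r pq => (PySem.List.pyRange (pq.1 + 1) pq.2 1).foldl
          (fun r position => PySem.List.pySetD r position (min (position - pq.1) (pq.2 - position))) r)
        res)[i]? =
      match (l.zip l.tail).find? (fun pq => decide (pq.1 < (i : Int) ∧ (i : Int) < pq.2)) with
      | some pq => some (min ((i : Int) - pq.1) (pq.2 - (i : Int)))
      | none => res[i]?
  | [], res => by intro _ _ _; simp
  | [p], res => by intro _ _ _; simp
  | p :: q :: t, res => by
      intro hs hnn hub
      have hzip : (p :: q :: t).zip (p :: q :: t).tail = (p, q) :: (q :: t).zip t := by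
        simp [List.zip]
      rw [hzip, List.foldl_cons]
      have hres' : ((PySem.List.pyRange (p + 1) q 1).foldl
          (fun r position => PySem.List.pySetD r position (min (position - p) (q - position))) res).length
          = res.length := pv_length_foldl_setD _ _ _
      have htail_eq : (q :: t).tail = t := rfl
      have hs' : (q :: t).Pairwise (· < ·) := hs.of_cons
      have hih := pv_getElem?_foldl_pairs i (q :: t)
        ((PySem.List.pyRange (p + 1) q 1).foldl
          (fun r position => PySem.List.pySetD r position (min (position - p) (q - position))) res)
        hs' (fun x hx => hnn x (List.mem_cons_of_mem _ hx))
        (fun x hx => by rw [hres']; exact hub x (List.mem_cons_of_mem _ hx))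
      rw [htail_eq] at hih
      rw [hih]
      have hwrite := pv_getElem?_foldl_setD
        (fun position => min (position - p) (q - position)) q (p + 1) res i
        (by have := hnn p (by simp); omega)
        (by have := hub q (by simp); omega)
      by_cases hc : p < (i : Int) ∧ (i : Int) < q
      · -- the head pair straddles i: no later pair can, and the inner write hit i
        rw [List.find?_cons_of_pos (h := by simpa using hc)]
        have hnone : ((q :: t).zip t).find?
            (fun pq => decide (pq.1 < (i : Int) ∧ (i : Int) < pq.2)) = none := by
          rw [List.find?_eq_none]
          intro pq hpq
          have h1 : pq.1 ∈ q :: t := (List.of_mem_zip hpq).1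
          have hq_le : q ≤ pq.1 := by
            rcases List.mem_cons.mp h1 with heq | h1'
            · rw [heq]
            · exact le_of_lt (List.rel_of_pairwise_cons hs' h1')
          simp only [decide_eq_true_eq]
          omega
        rw [hnone]
        rw [hwrite, if_pos (by omega)]
      · rw [List.find?_cons_of_neg (h := by simpa using hc)]
        have : ((PySem.List.pyRange (p + 1) q 1).foldl
            (fun r position => PySem.List.pySetD r position (min (position - p) (q - position))) res)[i]?
            = res[i]? := by rw [hwrite, if_neg (by omega)]
        rw [this]

-- Python min of a nonempty Int list returns THE minimum value
theorem pv_min?_id_eq (xs : List Int) (v : Int) (hv : v ∈ xs) (hle : ∀ y ∈ xs, v ≤ y) :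
    PySem.List.min? xs (fun x => x) = some v := by
  rcases hm : PySem.List.min? xs (fun x => x) with _ | m
  · rw [PySem.List.min?_eq_none_iff] at hm
    subst hm; exact absurd hv (List.not_mem_nil)
  · have h1 : m ∈ xs := PySem.List.min?_mem hm
    have h2 : m ≤ v := PySem.List.min?_isMin hm v hv
    have h3 : v ≤ m := hle m h1
    rw [le_antisymm h2 h3]

theorem pv_sorted_head_min (Z : List Int) (hs : Z.Pairwise (· < ·)) (f : Int)
    (hf : Z.head? = some f) : ∀ j ∈ Z, f ≤ j := by
  rcases Z with _ | ⟨z, t⟩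
  · simp at hf
  · simp only [List.head?_cons, Option.some.injEq] at hf
    subst hf
    intro j hj
    rcases List.mem_cons.mp hj with heq | hmem
    · rw [heq]
    · exact le_of_lt (List.rel_of_pairwise_cons hs hmem)

theorem pv_sorted_last_max : ∀ (Z : List Int), Z.Pairwise (· < ·) → ∀ (l : Int),
    Z.getLast? = some l → ∀ j ∈ Z, j ≤ l
  | [], _, l, hl => by simp at hl
  | [z], _, l, hl => by
      simp only [List.getLast?_singleton, Option.some.injEq] at hl
      subst hl; intro j hj; rcases List.mem_cons.mp hj with heq | hmem
      · rw [heq]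
      · exact absurd hmem (List.not_mem_nil)
  | z :: z' :: t, hs, l, hl => by
      have hl' : (z' :: t).getLast? = some l := by
        rw [← hl]; exact (List.getLast?_cons_cons ..).symm
      have ih := pv_sorted_last_max (z' :: t) hs.of_cons l hl'
      intro j hj
      rcases List.mem_cons.mp hj with heq | hmem
      · have hlm : l ∈ z' :: t := List.mem_of_getLast? hl'
        have := List.rel_of_pairwise_cons hs hlm
        omega
      · exact ih j hmem

-- a sorted list with no straddling adjacent pair has no gap: anything between head and last is in it
theorem pv_between_mem : ∀ (Z : List Int), Z.Pairwise (· < ·) → ∀ (x : Int),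
    (∀ pq ∈ Z.zip Z.tail, ¬(pq.1 < x ∧ x < pq.2)) →
    ∀ f ∈ Z.head?, f ≤ x → ∀ l ∈ Z.getLast?, x ≤ l → x ∈ Z
  | [], _, x, _, f, hf, _, _, _, _ => by simp at hf
  | [z], _, x, hng, f, hf, hfx, l, hl, hxl => by
      simp only [List.head?_cons, Option.mem_def, Option.some.injEq] at hf
      simp only [List.getLast?_singleton, Option.mem_def, Option.some.injEq] at hl
      have : x = z := by omega
      rw [this]; exact List.mem_cons_self
  | z :: z' :: t, hs, x, hng, f, hf, hfx, l, hl, hxl => by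
      simp only [List.head?_cons, Option.mem_def, Option.some.injEq] at hf
      subst hf
      by_cases hxz : x = z
      · rw [hxz]; exact List.mem_cons_self
      · have hzx : z < x := by omega
        have hpair : ((z, z') : Int × Int) ∈ (z :: z' :: t).zip (z :: z' :: t).tail := by
          simp [List.zip]
        have hz'x : z' ≤ x := by
          have := hng _ hpair; simp at this; omega
        have hl' : (z' :: t).getLast? = some l := by
          rw [Option.mem_def] at hl
          rw [← hl, List.getLast?_cons_cons]
        refine List.mem_cons_of_mem _ (pv_between_mem (z' :: t) hs.of_cons x ?_
          z' (by simp) hz'x l (by rw [hl']; rfl) hxl)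
        intro pq hpq
        refine hng pq ?_
        have : (z :: z' :: t).zip (z :: z' :: t).tail = (z, z') :: (z' :: t).zip t := by
          simp [List.zip]
        rw [this]
        exact List.mem_cons_of_mem _ hpq

-- facts about the occurrence list
theorem pv_zeroes_pairwise (array : List String) (d : String) :
    (pvZeroes array d).Pairwise (· < ·) := by
  unfold pvZeroes
  refine List.Pairwise.filterMap _ ?_ (PySem.List.pairwise_lt_enumerate array 0)
  intro a b hab x hx y hy
  by_cases ha : a.2 = d
  · by_cases hb : b.2 = d
    · rw [if_pos ha] at hx; rw [if_pos hb] at hy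
      cases hx; cases hy; exact hab
    · rw [if_neg hb] at hy; cases hy
  · rw [if_neg ha] at hx; cases hx

theorem pv_zeroes_bounds (array : List String) (d : String) :
    ∀ j ∈ pvZeroes array d, 0 ≤ j ∧ j < (array.length : Int) := by
  intro j hj
  unfold pvZeroes at hj
  obtain ⟨p, hp, hpj⟩ := List.mem_filterMap.mp hj
  rw [PySem.List.mem_enumerate_iff] at hp
  obtain ⟨k, hk, rfl⟩ := hp
  by_cases hd : array[k] = d
  · rw [if_pos hd] at hpj
    cases hpj
    constructor <;> [omega; (push_cast; omega)]
  · rw [if_neg hd] at hpj; cases hpj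

theorem pv_zeroes_ne_nil (array : List String) (d : String) (h : d ∈ array) :
    pvZeroes array d ≠ [] := by
  obtain ⟨k, hk, hkd⟩ := List.mem_iff_getElem.mp h
  intro hnil
  have : ((k : Int)) ∈ pvZeroes array d := by
    unfold pvZeroes
    refine List.mem_filterMap.mpr ⟨((0 : Int) + k, array[k]), ?_, ?_⟩
    · rw [PySem.List.mem_enumerate_iff]
      exact ⟨k, hk, rfl⟩
    · simp [hkd]
  rw [hnil] at this
  exact List.not_mem_nil this

theorem pv_length_foldl_pairs : ∀ (l : List (Int × Int)) (res : List Int),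
    (l.foldl
        (fun r pq => (PySem.List.pyRange (pq.1 + 1) pq.2 1).foldl
          (fun r position => PySem.List.pySetD r position (min (position - pq.1) (pq.2 - position))) r)
        res).length = res.length
  | [], _ => rfl
  | pq :: l, res => by
      rw [List.foldl_cons, pv_length_foldl_pairs l, pv_length_foldl_setD]

theorem pv_acore_length (Z : List Int) (n : Nat) : (pvAcore Z n).length = n := by
  simp only [pvAcore]
  split_ifs
  · rw [pv_length_foldl_setD, pv_length_foldl_pairs, pv_length_foldl_setD, List.length_replicate]
  · rw [pv_length_foldl_pairs, pv_length_foldl_setD, List.length_replicate]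

-- the heart of the proof: element i of A's core equals min over Z of |i - j|
theorem pv_acore_getElem? (Z : List Int) (n : Nat) (hs : Z.Pairwise (· < ·))
    (hb : ∀ j ∈ Z, 0 ≤ j ∧ j < (n : Int)) (hne : Z ≠ []) (i : Nat) (hi : i < n) :
    (pvAcore Z n)[i]? =
      some ((PySem.List.min? (Z.map (fun j => |(i : Int) - j|)) (fun x => x)).getD 0) := by
  have hf : Z.head? = some (Z.head hne) := List.head?_eq_head hne
  have hlst : Z.getLast? = some (Z.getLast hne) := List.getLast?_eq_getLast hne
  set f := Z.head hne with hfdef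
  set lst := Z.getLast hne with hlstdef
  have hf_mem : f ∈ Z := List.head_mem hne
  have hl_mem : lst ∈ Z := List.getLast_mem hne
  have hf_min : ∀ j ∈ Z, f ≤ j := pv_sorted_head_min Z hs f hf
  have hl_max : ∀ j ∈ Z, j ≤ lst := pv_sorted_last_max Z hs lst hlst
  have hfb := hb f hf_mem
  have hlb := hb lst hl_mem
  -- abbreviations for the three stages
  have e1 : ∀ j : Int, (i : Int) - j ≤ |(i : Int) - j| := fun j => le_abs_self _
  have e2 : ∀ j : Int, j - (i : Int) ≤ |(i : Int) - j| := fun j => by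
    rw [abs_sub_comm]; exact le_abs_self _
  simp only [pvAcore, PySem.List.pyGet?_zero, PySem.List.pyGet?_neg_one,
    ← List.head?_eq_getElem?, hf, hlst, Option.getD_some]
  have hlen1 : ((PySem.List.pyRange 0 f 1).foldl
      (fun r pos => PySem.List.pySetD r pos (f - pos)) (List.replicate n (0 : Int))).length = n := by
    rw [pv_length_foldl_setD, List.length_replicate]
  have h1 : ((PySem.List.pyRange 0 f 1).foldl
      (fun r pos => PySem.List.pySetD r pos (f - pos)) (List.replicate n (0 : Int)))[i]? =
      if (i : Int) < f then some (f - i) else some 0 := by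
    rw [pv_getElem?_foldl_setD (fun pos => f - pos) f 0 _ i le_rfl
      (by rw [List.length_replicate]; omega)]
    by_cases hc : (i : Int) < f
    · rw [if_pos ⟨by omega, hc⟩, if_pos hc]
    · rw [if_neg (by omega), if_neg hc, List.getElem?_replicate, if_pos hi]
  have h2 := pv_getElem?_foldl_pairs i Z
    ((PySem.List.pyRange 0 f 1).foldl
      (fun r pos => PySem.List.pySetD r pos (f - pos)) (List.replicate n (0 : Int)))
    hs (fun x hx => (hb x hx).1) (fun x hx => by rw [hlen1]; exact le_of_lt (hb x hx).2)
  have hlen2 : ((Z.zip Z.tail).foldl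
      (fun r pq => (PySem.List.pyRange (pq.1 + 1) pq.2 1).foldl
        (fun r position => PySem.List.pySetD r position (min (position - pq.1) (pq.2 - position))) r)
      ((PySem.List.pyRange 0 f 1).foldl
        (fun r pos => PySem.List.pySetD r pos (f - pos)) (List.replicate n (0 : Int)))).length = n := by
    rw [pv_length_foldl_pairs, hlen1]
  by_cases hli : lst < (i : Int)
  · -- to the right of the last occurrence
    rw [if_pos (show lst ≠ (n : Int) - 1 by omega)]
    rw [pv_getElem?_foldl_setD (fun pos => pos - lst) (n : Int) (lst + 1) _ i (by omega)
      (by rw [hlen2])]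
    rw [if_pos (by omega)]
    rw [pv_min?_id_eq _ ((i : Int) - lst)
      (List.mem_map.mpr ⟨lst, hl_mem, by rw [abs_of_nonneg (by omega)]⟩)
      (by
        intro y hy
        obtain ⟨j, hj, rfl⟩ := List.mem_map.mp hy
        have := hl_max j hj
        have := e1 j; have := e2 j
        omega),
      Option.getD_some]
  · -- at or left of the last occurrence: the suffix loop does not touch i
    have houter : (if lst ≠ (n : Int) - 1 then
        (PySem.List.pyRange (lst + 1) (n : Int) 1).foldl
          (fun r pos => PySem.List.pySetD r pos (pos - lst))
          ((Z.zip Z.tail).foldl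
            (fun r pq => (PySem.List.pyRange (pq.1 + 1) pq.2 1).foldl
              (fun r position => PySem.List.pySetD r position (min (position - pq.1) (pq.2 - position))) r)
            ((PySem.List.pyRange 0 f 1).foldl
              (fun r pos => PySem.List.pySetD r pos (f - pos)) (List.replicate n (0 : Int))))
      else
        (Z.zip Z.tail).foldl
          (fun r pq => (PySem.List.pyRange (pq.1 + 1) pq.2 1).foldl
            (fun r position => PySem.List.pySetD r position (min (position - pq.1) (pq.2 - position))) r)
          ((PySem.List.pyRange 0 f 1).foldl
            (fun r pos => PySem.List.pySetD r pos (f - pos)) (List.replicate n (0 : Int))))[i]? =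
        ((Z.zip Z.tail).foldl
          (fun r pq => (PySem.List.pyRange (pq.1 + 1) pq.2 1).foldl
            (fun r position => PySem.List.pySetD r position (min (position - pq.1) (pq.2 - position))) r)
          ((PySem.List.pyRange 0 f 1).foldl
            (fun r pos => PySem.List.pySetD r pos (f - pos)) (List.replicate n (0 : Int))))[i]? := by
      by_cases hcase : lst = (n : Int) - 1
      · rw [if_neg (not_not_intro hcase)]
      · rw [if_pos hcase]
        rw [pv_getElem?_foldl_setD (fun pos => pos - lst) (n : Int) (lst + 1) _ i (by omega)
          (by rw [hlen2])]
        rw [if_neg (by omega)]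
    rw [houter, h2]
    rcases hfind : (Z.zip Z.tail).find? (fun pq => decide (pq.1 < (i : Int) ∧ (i : Int) < pq.2))
        with _ | pq
    · -- no straddling pair
      rw [hfind, h1]
      by_cases hif : (i : Int) < f
      · rw [if_pos hif]
        rw [pv_min?_id_eq _ (f - (i : Int))
          (List.mem_map.mpr ⟨f, hf_mem, by rw [abs_of_nonpos (by omega)]; ring⟩)
          (by
            intro y hy
            obtain ⟨j, hj, rfl⟩ := List.mem_map.mp hy
            have := hf_min j hj
            have := e1 j; have := e2 j
            omega),
          Option.getD_some]
      · -- i lies between first and last with no straddling pair: i itself is an occurrence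
        rw [if_neg hif]
        have hmem : (i : Int) ∈ Z := by
          refine pv_between_mem Z hs (i : Int) ?_ f (by rw [hf]; rfl) (by omega)
            lst (by rw [hlst]; rfl) (by omega)
          intro pq hpq hcontra
          have := List.find?_eq_none.mp hfind pq hpq
          simp only [decide_eq_true_eq] at this
          exact this hcontra
        rw [pv_min?_id_eq _ 0
          (List.mem_map.mpr ⟨(i : Int), hmem, by rw [sub_self, abs_zero]⟩)
          (by
            intro y hy
            obtain ⟨j, hj, rfl⟩ := List.mem_map.mp hy
            exact abs_nonneg _),
          Option.getD_some]
    · -- i straddled by the adjacent pair pq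
      have hP : pq.1 < (i : Int) ∧ (i : Int) < pq.2 := by
        have := List.find?_some hfind
        simpa using this
      rw [hfind]
      have hmemz := List.mem_of_find?_eq_some hfind
      have hsplit := pv_adj_split Z hs pq hmemz
      have hp_mem : pq.1 ∈ Z := (List.of_mem_zip hmemz).1
      have hq_mem : pq.2 ∈ Z := List.mem_of_mem_tail (List.of_mem_zip hmemz).2
      have hmin_mem : min ((i : Int) - pq.1) (pq.2 - (i : Int)) ∈
          Z.map (fun j => |(i : Int) - j|) := by
        rcases le_total ((i : Int) - pq.1) (pq.2 - (i : Int)) with hc | hc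
        · exact List.mem_map.mpr ⟨pq.1, hp_mem, by rw [abs_of_nonneg (by omega)]; omega⟩
        · exact List.mem_map.mpr ⟨pq.2, hq_mem, by rw [abs_of_nonpos (by omega)]; omega⟩
      rw [pv_min?_id_eq _ (min ((i : Int) - pq.1) (pq.2 - (i : Int))) hmin_mem
        (by
          intro y hy
          obtain ⟨j, hj, rfl⟩ := List.mem_map.mp hy
          have := hsplit j hj
          have := e1 j; have := e2 j
          omega),
        Option.getD_some]

theorem pv_alt_getElem? (array : List String) (d : String) (i : Nat) (hi : i < array.length) :
    (distance_search_alt array d)[i]? =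
      some ((PySem.List.min? ((pvZeroes array d).map (fun j => |(i : Int) - j|)) (fun x => x)).getD 0) := by
  simp only [distance_search_alt]
  rw [PySem.List.getElem?_map_pyRange_zero _ _ _ hi]
  rfl

theorem pv_alt_length (array : List String) (d : String) :
    (distance_search_alt array d).length = array.length := by
  simp only [distance_search_alt, List.length_map, PySem.List.length_pyRange_one]
  omega

-- ===== VERDICT (by name: the statement is the Claim_ definition above) =====
theorem distance_search_spec : Claim_equal_distance_search := by
  intro array d _hdom hpre
  have hne : pvZeroes array d ≠ [] := pv_zeroes_ne_nil array d hpre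
  show distance_search array d = distance_search_alt array d
  apply List.ext_getElem?
  intro i
  by_cases hi : i < array.length
  · rw [pv_alt_getElem? array d i hi]
    show (pvAcore (pvZeroes array d) array.length)[i]? = _
    exact pv_acore_getElem? (pvZeroes array d) array.length
      (pv_zeroes_pairwise array d) (pv_zeroes_bounds array d) hne i hi
  · rw [List.getElem?_eq_none, List.getElem?_eq_none]
    · rw [pv_alt_length]; omega
    · show (pvAcore (pvZeroes array d) array.length).length ≤ i
      rw [pv_acore_length]; omega
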